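-- pv_equiv track=rewrite | github.com/meiheW/Servo-Assembly | Application/FindGear/监测-python/ImageProc.py | getmeanBottom2
-- ===== SOURCE A (Python) =====
-- def getmeanBottom2(l):
--     maxv=max(l)
--     minv=min(l)
--
--     xx=[0 for x in range(0, maxv-minv+1)]
--     for i in range(0,maxv-minv):
--         for v in l[:]:
--             if abs(i+minv-v)<2:
--                 xx[i]=xx[i]+1
--
--     return xx.index(max(xx))+minv
-- ===== SOURCE B (Python) =====
-- def getmeanBottom2(l):
--     minv = min(l)
--     maxv = max(l)
--     cnt = {}
--     for v in l:
--         cnt[v] = cnt.get(v, 0) + 1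
--     best_c = 0
--     best_i = minv
--     for i in range(minv, maxv):
--         c = cnt.get(i - 1, 0) + cnt.get(i, 0) + cnt.get(i + 1, 0)
--         if c > best_c:
--             best_c = c
--             best_i = i
--     return best_i
-- ===== Notes on version B (the rewrite author's own statement) =====
-- stated objective: faster
-- what changed: Replace the nested scan (for each candidate value, rescan the whole list to count neighbors) by a histogram built in one pass over the list plus a width-3 window sum per candidate value, keeping a running first-strict-max instead of building the xx array and calling max/index.
import Mathlib
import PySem

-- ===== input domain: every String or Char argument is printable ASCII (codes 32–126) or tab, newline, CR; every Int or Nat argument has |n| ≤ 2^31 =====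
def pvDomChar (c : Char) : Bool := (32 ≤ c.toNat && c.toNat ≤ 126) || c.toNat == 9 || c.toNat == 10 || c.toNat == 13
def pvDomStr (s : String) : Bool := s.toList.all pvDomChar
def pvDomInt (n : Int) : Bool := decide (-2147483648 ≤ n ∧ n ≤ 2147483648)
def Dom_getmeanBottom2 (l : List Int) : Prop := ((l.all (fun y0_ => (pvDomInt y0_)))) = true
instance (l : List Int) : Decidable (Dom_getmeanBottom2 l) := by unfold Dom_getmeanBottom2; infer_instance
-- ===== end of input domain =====

-- B replaces A's rescan-the-list-per-candidate counting by a one-pass histogram and a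
-- width-3 window with a running first-strict-max (faster: O(n+range) vs O(range*n)).

-- ===== PORT A =====
def getmeanBottom2 (l : List Int) : Int :=
  match PySem.List.max? l (fun x => x), PySem.List.min? l (fun x => x) with
  | some maxv, some minv =>
    let xx0 : List Int := (PySem.List.pyRange 0 (maxv - minv + 1) 1).map (fun _ => 0)
    let xx : List Int :=
      (PySem.List.pyRange 0 (maxv - minv) 1).foldl
        (fun xx i =>
          l.foldl
            (fun xx v =>
              if |i + minv - v| < 2 then
                PySem.List.pySetD xx i (PySem.List.pyGetD xx i 0 + 1)
              else xx)
            xx)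
        xx0
    (match PySem.List.max? xx (fun x => x) with
     | some m =>
       (match PySem.List.index? xx m with
        | some k => (k : Int) + minv
        | none => 0)   -- unreachable: max(xx) is an element of xx
     | none => 0)      -- unreachable: xx is nonempty
  | _, _ => 0          -- unreachable under Pre_: max/min of empty list raise

-- ===== PORT B =====
def getmeanBottom2_alt (l : List Int) : Int :=
  match PySem.List.min? l (fun x => x) with
  | none => 0          -- unreachable under Pre_: min of empty list raises
  | some minv =>
    match PySem.List.max? l (fun x => x) with
    | none => 0        -- unreachable under Pre_
    | some maxv =>
      let cnt : PySem.Dict Int Int :=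
        l.foldl (fun d v => d.insert v (d.getD v 0 + 1)) PySem.Dict.empty
      let s : Int × Int :=
        (PySem.List.pyRange minv maxv 1).foldl
          (fun s i =>
            let c := cnt.getD (i - 1) 0 + cnt.getD i 0 + cnt.getD (i + 1) 0
            if c > s.1 then (c, i) else s)
          (0, minv)
      s.2

-- ===== PRECONDITION & SPEC =====
-- Pre_ excludes only the empty list, on which Python's max(l) raises ValueError.
def Pre_getmeanBottom2 (l : List Int) : Prop := l ≠ []
instance (l : List Int) : Decidable (Pre_getmeanBottom2 l) := by unfold Pre_getmeanBottom2; infer_instance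
def pvWitness_getmeanBottom2 : List Int := [0]

def Spec_getmeanBottom2 (l : List Int) (out : Int) : Prop := out = getmeanBottom2_alt l
instance (l : List Int) (out : Int) : Decidable (Spec_getmeanBottom2 l out) := by unfold Spec_getmeanBottom2; infer_instance

-- ===== CLAIM (what is proved, stated in full; the proofs are below) =====
def Claim_equal_getmeanBottom2 : Prop := ∀ (l : List Int), Dom_getmeanBottom2 l → Pre_getmeanBottom2 l → Spec_getmeanBottom2 l (getmeanBottom2 l)

-- ===== LEMMAS AND PROOFS =====

lemma pv_inner_fold (l : List Int) (q : Int) (k : Nat) (xx : List Int) (hk : k < xx.length) :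
    l.foldl
      (fun xx v =>
        if |q - v| < 2 then
          PySem.List.pySetD xx (k : Int) (PySem.List.pyGetD xx (k : Int) 0 + 1)
        else xx)
      xx
    = xx.set k (xx.getD k 0 + (l.countP (fun v => decide (|q - v| < 2)) : Int)) := by
  induction l generalizing xx with
  | nil =>
    simp only [List.foldl_nil, List.countP_nil, Int.natCast_zero, add_zero]
    rw [List.getD_eq_getElem _ _ hk, List.set_getElem_self hk]
  | cons v t ih =>
    rw [List.foldl_cons]
    by_cases h : |q - v| < 2
    · rw [if_pos h, ih _ (by simpa using hk)]
      rw [PySem.List.pySetD_natCast, PySem.List.pyGetD_natCast, List.set_set]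
      have h1 : (xx.set k (xx.getD k 0 + 1)).getD k 0 = xx.getD k 0 + 1 := by
        rw [List.getD_eq_getElem _ _ (by simpa using hk), List.getElem_set_self,
          List.getD_eq_getElem _ _ hk]
      rw [h1, List.countP_cons]
      simp only [h, decide_true, if_pos]
      congr 1
      push_cast
      ring
    · rw [if_neg h, ih _ hk, List.countP_cons]
      simp [h]

lemma pv_outer_fold (l : List Int) (minv : Int) :
    ∀ (m : Nat) (xx : List Int), m ≤ xx.length →
      (PySem.List.pyRange 0 (m : Int) 1).foldl
        (fun xx i =>
          l.foldl
            (fun xx v =>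
              if |i + minv - v| < 2 then
                PySem.List.pySetD xx i (PySem.List.pyGetD xx i 0 + 1)
              else xx)
            xx)
        xx
      = (List.range m).map
          (fun k => xx.getD k 0 + (l.countP (fun v => decide (|(k : Int) + minv - v| < 2)) : Int))
        ++ xx.drop m := by
  intro m
  induction m with
  | zero => intro xx h; simp
  | succ m ih =>
    intro xx h
    have hm : m < xx.length := by omega
    have hsplit : PySem.List.pyRange 0 ((m + 1 : Nat) : Int) 1
        = PySem.List.pyRange 0 (m : Int) 1 ++ [(m : Int)] := by
      push_cast
      exact PySem.List.pyRange_one_succ_right (by positivity)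
    rw [hsplit, List.foldl_append, ih xx (by omega), List.foldl_cons, List.foldl_nil]
    set pre := (List.range m).map
          (fun k => xx.getD k 0 + (l.countP (fun v => decide (|(k : Int) + minv - v| < 2)) : Int)) with hpre
    have hlen : m < (pre ++ xx.drop m).length := by
      simp [hpre, List.length_drop]; omega
    rw [pv_inner_fold l ((m : Int) + minv) m _ hlen]
    have hpl : pre.length = m := by simp [hpre]
    have hgd : (pre ++ xx.drop m).getD m 0 = xx.getD m 0 := by
      rw [List.getD_eq_getElem _ _ hlen, List.getD_eq_getElem _ _ hm]
      rw [List.getElem_append_right (by omega)]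
      simp [hpl]
    rw [hgd]
    rw [List.drop_eq_getElem_cons hm]
    rw [List.set_append_right _ _ (by omega)]
    simp only [hpl, Nat.sub_self, List.set_cons_zero]
    rw [List.range_succ, List.map_append]
    simp [hpre, List.append_assoc]

def pvScan (bc bi pos : Int) : List Int → Int
  | [] => bi
  | c :: t => if c > bc then pvScan c pos (pos + 1) t else pvScan bc bi (pos + 1) t

lemma pv_scan_eq (ws : List Int) : ∀ (bc bi pos : Int),
    pvScan bc bi pos ws =
      if bc < ws.foldl max bc then
        pos + (((PySem.List.index? ws (ws.foldl max bc)).getD 0 : Nat) : Int)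
      else bi := by
  induction ws with
  | nil => intro bc bi pos; simp [pvScan]
  | cons c t ih =>
    intro bc bi pos
    rw [List.foldl_cons]
    by_cases h : c > bc
    · rw [pvScan, if_pos h, ih]
      have hmax : max bc c = c := by omega
      rw [hmax]
      have hF : c ≤ t.foldl max c := (PySem.List.le_foldl_max t c).1
      by_cases h2 : c < t.foldl max c
      · rw [if_pos h2, if_pos (by omega)]
        have hmem : t.foldl max c ∈ t := by
          rcases PySem.List.foldl_max_mem t c with h3 | h3
          · omega
          · exact h3
        obtain ⟨j, hj⟩ := (PySem.List.index?_isSome_iff t (t.foldl max c)).mpr hmem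
          |> Option.isSome_iff_exists.mp
        rw [PySem.List.index?_cons_of_ne t (show c ≠ t.foldl max c by omega), hj]
        simp
        omega
      · have hF' : t.foldl max c = c := by omega
        rw [if_neg h2, hF', if_pos h, PySem.List.index?_cons_self]
        simp
    · rw [pvScan, if_neg h, ih]
      have hmax : max bc c = bc := by omega
      rw [hmax]
      by_cases h2 : bc < t.foldl max bc
      · rw [if_pos h2, if_pos h2]
        have hmem : t.foldl max bc ∈ t := by
          rcases PySem.List.foldl_max_mem t bc with h3 | h3
          · omega
          · exact h3
        obtain ⟨j, hj⟩ := (PySem.List.index?_isSome_iff t (t.foldl max bc)).mpr hmem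
          |> Option.isSome_iff_exists.mp
        rw [PySem.List.index?_cons_of_ne t (show c ≠ t.foldl max bc by omega), hj]
        simp
        omega
      · rw [if_neg h2, if_neg h2]

lemma pv_afinal (ws : List Int) (minv : Int) (hnn : ∀ x ∈ ws, 0 ≤ x) :
    (match PySem.List.max? (ws ++ [0]) (fun x => x) with
     | some m =>
       (match PySem.List.index? (ws ++ [0]) m with
        | some k => (k : Int) + minv
        | none => 0)
     | none => 0)
    = pvScan 0 minv minv ws := by
  have hM : PySem.List.max? (ws ++ [0]) (fun x => x) = some (ws.foldl max 0) := by
    cases ws with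
    | nil => simp [PySem.List.max?_id_cons]
    | cons w t =>
      have hw : 0 ≤ w := hnn w (by simp)
      rw [List.cons_append, PySem.List.max?_id_cons]
      have h1 : (t ++ [0]).foldl max w = max (t.foldl max w) 0 := by
        rw [List.foldl_append]; simp
      have h2 : max (t.foldl max w) 0 = t.foldl max w := by
        have := (PySem.List.le_foldl_max t w).1; omega
      rw [List.foldl_cons]
      have h3 : max 0 w = w := by omega
      rw [h3, h1, h2]
  rw [hM]
  dsimp only
  rw [pv_scan_eq]
  by_cases h : 0 < ws.foldl max 0
  · rw [if_pos h]
    have hmem : ws.foldl max 0 ∈ ws := by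
      rcases PySem.List.foldl_max_mem ws 0 with h3 | h3
      · omega
      · exact h3
    obtain ⟨j, hj⟩ := Option.isSome_iff_exists.mp
      ((PySem.List.index?_isSome_iff ws (ws.foldl max 0)).mpr hmem)
    rw [PySem.List.index?_append_of_mem [0] hmem, hj]
    dsimp only
    simp
    ring
  · rw [if_neg h]
    have h0 : ws.foldl max 0 = 0 := by
      have := (PySem.List.le_foldl_max ws 0).1; omega
    rw [h0]
    cases ws with
    | nil =>
      simp
    | cons w t =>
      have hw0 : w = 0 := by
        have h1 := hnn w (by simp)
        have h2 := (PySem.List.le_foldl_max t (max 0 w)).1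
        have h3 : max 0 w = w := max_eq_right h1
        rw [List.foldl_cons, h3] at h0
        have h2' : w ≤ t.foldl max w := by rw [h3] at h2; exact h2
        omega
      subst hw0
      rw [List.cons_append, PySem.List.index?_cons_self]
      dsimp only
      simp

lemma pv_foldl_scan (g : Int → Int) : ∀ (n : Nat) (a : Int) (s : Int × Int),
    ((PySem.List.pyRange a (a + (n : Int)) 1).foldl
        (fun s i => if g i > s.1 then (g i, i) else s) s).2
    = pvScan s.1 s.2 a ((PySem.List.pyRange a (a + (n : Int)) 1).map g) := by
  intro n
  induction n with
  | zero =>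
    intro a s
    have hnil : PySem.List.pyRange a (a + ((0 : Nat) : Int)) 1 = [] :=
      PySem.List.pyRange_one_eq_nil (by simp)
    rw [hnil]
    simp [pvScan]
  | succ n ih =>
    intro a s
    have hcons : PySem.List.pyRange a (a + ((n + 1 : Nat) : Int)) 1
        = a :: PySem.List.pyRange (a + 1) (a + 1 + (n : Int)) 1 := by
      rw [PySem.List.pyRange_one_cons (by push_cast; omega)]
      congr 1
      push_cast
      ring_nf
    rw [hcons, List.foldl_cons, List.map_cons]
    by_cases h : g a > s.1
    · rw [pvScan]
      simp only [if_pos h]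
      have := ih (a + 1) (g a, a)
      simpa using this
    · rw [pvScan]
      simp only [if_neg h]
      have := ih (a + 1) s
      simpa using this

lemma pv_count3 (l : List Int) (i : Int) :
    (l.countP (fun v => decide (|i - v| < 2)) : Int)
    = (l.count (i - 1) : Int) + (l.count i : Int) + (l.count (i + 1) : Int) := by
  induction l with
  | nil => simp
  | cons v t ih =>
    rw [List.countP_cons, List.count_cons, List.count_cons, List.count_cons]
    push_cast
    rw [ih]
    rcases eq_or_ne v (i - 1) with h1 | h1 <;> rcases eq_or_ne v i with h2 | h2 <;>
      rcases eq_or_ne v (i + 1) with h3 | h3 <;>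
      simp [h1, h2, h3, beq_iff_eq] <;>
      rcases abs_cases (i - v) with ⟨ha, _⟩ | ⟨ha, _⟩ <;> omega

-- ===== VERDICT (by name: the statement is the Claim_ definition above) =====
theorem getmeanBottom2_spec : Claim_equal_getmeanBottom2 := by
  intro l _ hpre
  unfold Spec_getmeanBottom2
  rw [Pre_getmeanBottom2] at hpre
  symm
  obtain ⟨x, t, rfl⟩ : ∃ x t, l = x :: t := by
    cases l with
    | nil => exact absurd rfl hpre
    | cons x t => exact ⟨x, t, rfl⟩
  simp only [getmeanBottom2, getmeanBottom2_alt, PySem.List.max?_id_cons,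
    PySem.List.min?_id_cons]
  set M := t.foldl max x with hM
  set m := t.foldl min x with hm
  have hmM : m ≤ M := by
    have h1 := (PySem.List.foldl_min_le t x).1
    have h2 := (PySem.List.le_foldl_max t x).1
    omega
  set n : Nat := (M - m).toNat with hn
  have hMn : M = m + (n : Int) := by omega
  have hMm : M - m = (n : Int) := by omega
  have hMm1 : M - m + 1 = ((n + 1 : Nat) : Int) := by push_cast; omega
  -- A side
  have hxx0 : (PySem.List.pyRange 0 (M - m + 1) 1).map (fun _ => (0 : Int))
      = List.replicate (n + 1) 0 := by
    rw [hMm1, PySem.List.pyRange_one]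
    simp [Function.comp_def]
  rw [hxx0, hMm]
  rw [pv_outer_fold (x :: t) m n (List.replicate (n + 1) 0) (by simp)]
  have hgd0 : ∀ k : Nat, (List.replicate (n + 1) (0 : Int)).getD k 0 = 0 := by
    intro k
    rcases lt_or_ge k (n + 1) with hk | hk
    · rw [List.getD_eq_getElem _ _ (by simpa using hk)]
      simp
    · rw [List.getD_eq_default _ _ (by simpa using hk)]
  have hdrop : (List.replicate (n + 1) (0 : Int)).drop n = [0] := by
    rw [List.drop_replicate]
    simp
  simp only [hgd0, hdrop, zero_add]
  rw [pv_afinal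
      ((List.range n).map
        (fun (k : Nat) => ((x :: t).countP (fun v => decide (|(k : Int) + m - v| < 2)) : Int)))
      m
      (by
        intro y hy
        simp only [List.mem_map] at hy
        obtain ⟨k, _, rfl⟩ := hy
        positivity)]
  -- B side
  set cnt : PySem.Dict Int Int :=
    (x :: t).foldl (fun d v => d.insert v (d.getD v 0 + 1)) PySem.Dict.empty with hcntd
  have hcnt : ∀ v : Int, cnt.getD v 0 = ((x :: t).count v : Int) := by
    intro v
    rw [hcntd, PySem.Dict.getD_foldl_insert_add_one]
    simp
  rw [hMn]
  rw [pv_foldl_scan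
      (fun i => cnt.getD (i - 1) 0 + cnt.getD i 0 + cnt.getD (i + 1) 0) n m (0, m)]
  congr 1
  rw [PySem.List.pyRange_one]
  have harg : (m + (n : Int) - m).toNat = n := by omega
  rw [harg, List.map_map]
  refine List.map_congr_left ?_
  intro k _
  dsimp only [Function.comp]
  rw [pv_count3 (x :: t) ((k : Int) + m), hcnt, hcnt, hcnt]
  ring_nf
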